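-- pv_equiv track=rewrite | github.com/SAlNT666/stepik_learning | course_for_professionals/repeat_the_basic_constructions/part_1/filter_anagrams_function.py | filter_anagrams
-- ===== SOURCE A (Python) =====
-- def filter_anagrams(word, words):
--     res = []
--
--     def create_dict(word):
--         new_dict = dict()
--         for l in word:
--             new_dict[l] = new_dict.get(l, 0) + 1
--         return new_dict
--
--     word_d = create_dict(word)
--
--     for w in words:
--         w_d = create_dict(w)
--         if word_d == w_d: res.append(w)
--     return res
-- ===== SOURCE B (Python) =====
-- def filter_anagrams(word, words):
--     key = sorted(word)
--     return [w for w in words if sorted(w) == key]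
-- ===== Notes on version B (the rewrite author's own statement) =====
-- stated objective: idiomatic
-- what changed: Replaces the per-word frequency-dict construction and unordered dict comparison with a single sorted-character canonical key for the target and a sorted-equality filter over the words.
import Mathlib
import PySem

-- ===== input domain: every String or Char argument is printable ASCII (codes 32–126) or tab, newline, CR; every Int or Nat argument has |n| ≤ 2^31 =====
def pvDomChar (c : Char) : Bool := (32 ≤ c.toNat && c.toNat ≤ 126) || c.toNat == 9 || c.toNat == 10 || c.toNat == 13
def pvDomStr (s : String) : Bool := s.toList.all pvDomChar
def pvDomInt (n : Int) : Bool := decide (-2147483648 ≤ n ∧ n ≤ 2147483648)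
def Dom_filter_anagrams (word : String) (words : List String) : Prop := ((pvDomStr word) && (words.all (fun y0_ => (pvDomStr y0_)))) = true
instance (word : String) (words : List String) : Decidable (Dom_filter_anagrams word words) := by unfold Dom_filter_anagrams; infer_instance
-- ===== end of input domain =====

-- B replaces A's per-word frequency-dict + unordered dict comparison with one sorted-character
-- canonical key and a sorted-equality filter (objective: idiomatic).

-- ===== PORT A =====
-- helper create_dict: new_dict[l] = new_dict.get(l, 0) + 1 over the characters of w
def fa_create_dict (w : List Char) : PySem.Dict Char Int :=
  w.foldl (fun d l => d.insert l (d.getD l 0 + 1)) PySem.Dict.empty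

-- Python's dict == ignores insertion order: equal sizes and every (k, v) of d1 looked up in d2
def fa_dictEq (d1 d2 : PySem.Dict Char Int) : Bool :=
  PySem.Dict.size d1 == PySem.Dict.size d2 &&
    d1.items.all (fun p => d2.get? p.1 == some p.2)

def filter_anagrams (word : String) (words : List String) : List String :=
  let word_d := fa_create_dict word.toList
  words.foldl (fun res w =>
    if fa_dictEq word_d (fa_create_dict w.toList) then res ++ [w] else res) []

-- ===== PORT B =====
def filter_anagrams_alt (word : String) (words : List String) : List String :=
  let key := PySem.List.sorted word.toList (fun x => x) false
  words.filter (fun w => PySem.List.sorted w.toList (fun x => x) false == key)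

-- ===== PRECONDITION & SPEC =====
def Spec_filter_anagrams (word : String) (words : List String) (out : List String) : Prop := out = filter_anagrams_alt word words
instance (word : String) (words : List String) (out : List String) : Decidable (Spec_filter_anagrams word words out) := by unfold Spec_filter_anagrams; infer_instance

-- ===== CLAIM (what is proved, stated in full; the proofs are below) =====
def Claim_equal_filter_anagrams : Prop := ∀ (word : String) (words : List String), Dom_filter_anagrams word words → Spec_filter_anagrams word words (filter_anagrams word words)

-- ===== LEMMAS AND PROOFS =====

lemma fa_create_dict_eq_counter (w : List Char) :
    fa_create_dict w = PySem.Dict.counter w :=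
  PySem.Dict.foldl_insert_getD_add_one_eq_counter w

-- The unordered dict comparison of the two counting dicts is exactly multiset equality.
lemma fa_dictEq_counter_iff (a b : List Char) :
    fa_dictEq (fa_create_dict a) (fa_create_dict b) = true ↔ a.Perm b := by
  rw [fa_create_dict_eq_counter, fa_create_dict_eq_counter]
  simp only [fa_dictEq, Bool.and_eq_true, beq_iff_eq, List.all_eq_true,
    PySem.Dict.items_counter, List.mem_map, PySem.Dict.size, List.length_map]
  constructor
  · rintro ⟨hlen, hall⟩
    -- every key of a appears in b with the same count
    have hmem : ∀ k ∈ PySem.Set.ofList a, k ∈ PySem.Set.ofList b ∧ a.count k = b.count k := by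
      intro k hk
      have := hall (k, (a.count k : Int)) ⟨k, hk, rfl⟩
      rw [PySem.Dict.get?_eq_some_iff_mem_items _ _ _ (PySem.Dict.nodup_keys_counter b),
        PySem.Dict.items_counter, List.mem_map] at this
      obtain ⟨k', hk', hkk'⟩ := this
      injection hkk' with h1 h2
      subst h1
      exact ⟨hk', by simpa using h2.symm⟩
    have hsub : PySem.Set.ofList a ⊆ PySem.Set.ofList b := fun k hk => (hmem k hk).1
    have hperm : (PySem.Set.ofList a).Perm (PySem.Set.ofList b) :=
      ((PySem.Set.nodup_ofList a).subperm hsub).perm_of_length_le (le_of_eq hlen.symm)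
    rw [List.perm_iff_count]
    intro k
    by_cases hk : k ∈ a
    · exact (hmem k ((PySem.Set.mem_ofList a k).2 hk)).2
    · have hkb : k ∉ b := by
        intro hb
        exact hk ((PySem.Set.mem_ofList a k).1 (hperm.mem_iff.2 ((PySem.Set.mem_ofList b k).2 hb)))
      simp [List.count_eq_zero_of_not_mem, hk, hkb]
  · intro hperm
    have hsets : (PySem.Set.ofList a).Perm (PySem.Set.ofList b) := by
      rw [List.perm_ext_iff_of_nodup (PySem.Set.nodup_ofList a) (PySem.Set.nodup_ofList b)]
      intro k
      rw [PySem.Set.mem_ofList, PySem.Set.mem_ofList]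
      exact hperm.mem_iff
    refine ⟨hsets.length_eq, ?_⟩
    rintro p ⟨k, hk, rfl⟩
    rw [PySem.Dict.get?_eq_some_iff_mem_items _ _ _ (PySem.Dict.nodup_keys_counter b),
      PySem.Dict.items_counter, List.mem_map]
    exact ⟨k, hsets.subset hk, by rw [hperm.count_eq]⟩

-- ===== VERDICT (by name: the statement is the Claim_ definition above) =====
theorem filter_anagrams_spec : Claim_equal_filter_anagrams := by
  intro word words _
  unfold Spec_filter_anagrams filter_anagrams filter_anagrams_alt
  simp only [PySem.List.foldl_append_if, List.nil_append, List.map_id']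
  apply List.filter_congr
  intro w _
  rw [Bool.eq_iff_iff, fa_dictEq_counter_iff, beq_iff_eq,
    PySem.List.sorted_id_eq_sorted_id_iff_perm]
  exact ⟨List.Perm.symm, List.Perm.symm⟩
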